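-- pv_equiv track=rewrite | github.com/jsandeman/Relational-Actualism | src/RA_AQFT/RA_BDG_Simulation.py | bdg_score_from_past
-- ===== SOURCE A (Python) =====
-- def bdg_score_from_past(past_v, past_lookup):
--     """Compute S_BDG for a candidate vertex given its past as a list of indices."""
--     N = [0]*5
--     for x in past_v:
--         between = sum(1 for z in past_v if x in past_lookup[z])
--         k_val = between + 1
--         if 1 <= k_val <= 4:
--             N[k_val] += 1
--     score = 1 - N[1] + 9*N[2] - 16*N[3] + 8*N[4]
--     return score, N
-- ===== SOURCE B (Python) =====
-- def bdg_score_from_past(past_v, past_lookup):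
--     """Compute S_BDG for a candidate vertex given its past as a list of indices."""
--     past_set = set(past_v)
--     count = {}
--     for z in past_v:
--         for x in set(past_lookup[z]):
--             if x in past_set:
--                 count[x] = count.get(x, 0) + 1
--     ks = [count.get(x, 0) + 1 for x in past_v]
--     n1, n2, n3, n4 = ks.count(1), ks.count(2), ks.count(3), ks.count(4)
--     return 1 - n1 + 9*n2 - 16*n3 + 8*n4, [0, n1, n2, n3, n4]
-- ===== Notes on version B (the rewrite author's own statement) =====
-- stated objective: faster
-- what changed: Replaces A's per-element rescan of all pasts by an inverted count table built in one sweep, derives each element's k-value by a single table lookup, and obtains the histogram N by counting equal k-values in a list instead of mutating an N array in a binning loop.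
import Mathlib
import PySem

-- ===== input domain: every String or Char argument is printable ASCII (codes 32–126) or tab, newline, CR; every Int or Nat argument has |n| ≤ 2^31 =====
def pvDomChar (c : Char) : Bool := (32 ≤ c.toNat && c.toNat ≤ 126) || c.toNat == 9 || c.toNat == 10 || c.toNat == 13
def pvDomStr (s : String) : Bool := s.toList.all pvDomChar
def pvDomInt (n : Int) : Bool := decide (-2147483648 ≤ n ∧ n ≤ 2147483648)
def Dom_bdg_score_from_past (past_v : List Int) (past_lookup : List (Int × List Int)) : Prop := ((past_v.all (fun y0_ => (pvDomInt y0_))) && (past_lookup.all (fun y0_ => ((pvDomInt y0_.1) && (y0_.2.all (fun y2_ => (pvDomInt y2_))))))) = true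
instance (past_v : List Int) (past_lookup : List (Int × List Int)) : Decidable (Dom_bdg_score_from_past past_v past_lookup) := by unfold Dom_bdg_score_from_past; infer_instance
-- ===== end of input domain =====

-- B builds an inverted count table in one sweep and reads the histogram N off by counting
-- equal k-values, instead of A's per-element membership rescan and in-place N binning (objective: faster).

-- Python's 'past_lookup[z]' (dict lookup; [] only where the key is missing, i.e. where
-- Python raises KeyError — those inputs are outside Pre_)
def pvLookup (past_lookup : List (Int × List Int)) (z : Int) : List Int :=
  ((PySem.Dict.mk past_lookup).get? z).getD []

-- ===== PORT A =====
-- 'between = sum(1 for z in past_v if x in past_lookup[z])'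
def pvBetween (past_v : List Int) (past_lookup : List (Int × List Int)) (x : Int) : Int :=
  past_v.foldl (fun acc z => if x ∈ pvLookup past_lookup z then acc + 1 else acc) 0

-- 'if 1 <= k_val <= 4: N[k_val] += 1'
def pvBin (N : List Int) (k_val : Int) : List Int :=
  if 1 ≤ k_val ∧ k_val ≤ 4 then PySem.List.pySetD N k_val (PySem.List.pyGetD N k_val 0 + 1) else N

def bdg_score_from_past (past_v : List Int) (past_lookup : List (Int × List Int)) : Int × List Int :=
  let N := past_v.foldl (fun N x =>
      let between := pvBetween past_v past_lookup x
      let k_val := between + 1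
      pvBin N k_val) (List.replicate 5 (0 : Int))
  let score := 1 - PySem.List.pyGetD N 1 0 + 9 * PySem.List.pyGetD N 2 0
    - 16 * PySem.List.pyGetD N 3 0 + 8 * PySem.List.pyGetD N 4 0
  (score, N)

-- ===== PORT B =====
-- the inverted count table: for z in past_v, for x in set(past_lookup[z]),
-- if x in past_set: count[x] = count.get(x, 0) + 1
def pvCount (past_set : PySem.Set Int) (past_v : List Int) (past_lookup : List (Int × List Int)) : PySem.Dict Int Int :=
  past_v.foldl (fun count z =>
      (PySem.Set.ofList (pvLookup past_lookup z)).foldl (fun count x =>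
        if PySem.Set.contains past_set x then count.modify x 0 (· + 1) else count) count)
    PySem.Dict.empty

def bdg_score_from_past_alt (past_v : List Int) (past_lookup : List (Int × List Int)) : Int × List Int :=
  let past_set := PySem.Set.ofList past_v
  let count := pvCount past_set past_v past_lookup
  let ks := past_v.map (fun x => count.getD x 0 + 1)
  let n1 : Int := ks.count 1
  let n2 : Int := ks.count 2
  let n3 : Int := ks.count 3
  let n4 : Int := ks.count 4
  (1 - n1 + 9 * n2 - 16 * n3 + 8 * n4, [0, n1, n2, n3, n4])

-- ===== PRECONDITION & SPEC =====
-- Pre_ excludes exactly the inputs where Python's 'past_lookup[z]' raises KeyError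
def Pre_bdg_score_from_past (past_v : List Int) (past_lookup : List (Int × List Int)) : Prop :=
  past_v.all (fun z => ((PySem.Dict.mk past_lookup).get? z).isSome) = true
instance (past_v : List Int) (past_lookup : List (Int × List Int)) : Decidable (Pre_bdg_score_from_past past_v past_lookup) := by unfold Pre_bdg_score_from_past; infer_instance

def pvWitness_bdg_score_from_past : List Int × (List (Int × List Int)) := ([0, 1], [(0, [1]), (1, [0, 1])])

def Spec_bdg_score_from_past (past_v : List Int) (past_lookup : List (Int × List Int)) (out : Int × List Int) : Prop := out = bdg_score_from_past_alt past_v past_lookup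
instance (past_v : List Int) (past_lookup : List (Int × List Int)) (out : Int × List Int) : Decidable (Spec_bdg_score_from_past past_v past_lookup out) := by unfold Spec_bdg_score_from_past; infer_instance

-- ===== CLAIM (what is proved, stated in full; the proofs are below) =====
def Claim_equal_bdg_score_from_past : Prop := ∀ (past_v : List Int) (past_lookup : List (Int × List Int)), Dom_bdg_score_from_past past_v past_lookup → Pre_bdg_score_from_past past_v past_lookup → Spec_bdg_score_from_past past_v past_lookup (bdg_score_from_past past_v past_lookup)

-- ===== LEMMAS AND PROOFS =====

-- a guarded modify-loop is the modify-loop over the filtered list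
theorem pv_foldl_if_filter (p : Int → Bool) (l : List Int) (d : PySem.Dict Int Int) :
    l.foldl (fun d x => if p x then d.modify x 0 (· + 1) else d) d
      = (l.filter p).foldl (fun d x => d.modify x 0 (· + 1)) d := by
  induction l generalizing d with
  | nil => rfl
  | cons a l ih => by_cases h : p a = true <;> simp [h, ih]

-- the nested build of a count table reads back as a sum of per-z counts
theorem pv_count_getD (g : Int → List Int) (pv : List Int) (d : PySem.Dict Int Int) (x : Int) :
    (pv.foldl (fun d z => (g z).foldl (fun d x => d.modify x 0 (· + 1)) d) d).getD x 0
      = d.getD x 0 + (pv.map (fun z => ((g z).count x : Int))).sum := by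
  induction pv generalizing d with
  | nil => simp
  | cons z pv ih =>
      simp only [List.foldl_cons, List.map_cons, List.sum_cons, ih,
        PySem.Dict.getD_foldl_modify_add_one]
      ring

-- on a duplicate-free list, count is the membership indicator
theorem pv_count_nodup (l : List Int) (h : l.Nodup) (x : Int) :
    l.count x = if x ∈ l then 1 else 0 := by
  by_cases hm : x ∈ l
  · simp [hm, List.count_eq_one_of_mem h hm]
  · simp [hm, List.count_eq_zero_of_not_mem hm]

-- A's 'between' as a sum
theorem pv_between_sum (q : Int → Prop) [DecidablePred q] (pv : List Int) (acc : Int) :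
    pv.foldl (fun acc z => if q z then acc + 1 else acc) acc
      = acc + (pv.map (fun z => if q z then (1 : Int) else 0)).sum := by
  induction pv generalizing acc with
  | nil => simp
  | cons z pv ih =>
      rcases Decidable.em (q z) with h | h
      · simp [h, ih]; ring
      · simp [h, ih]

-- the table read agrees with A's membership scan on every element of past_v
theorem pv_count_eq_between (past_v : List Int) (past_lookup : List (Int × List Int))
    (x : Int) (hx : x ∈ past_v) :
    (pvCount (PySem.Set.ofList past_v) past_v past_lookup).getD x 0
      = pvBetween past_v past_lookup x := by
  unfold pvCount pvBetween
  have hfold := PySem.List.foldl_congr_mem past_v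
    (init := (PySem.Dict.empty : PySem.Dict Int Int))
    (f := fun count z =>
      (PySem.Set.ofList (pvLookup past_lookup z)).foldl (fun count x =>
        if PySem.Set.contains (PySem.Set.ofList past_v) x then count.modify x 0 (· + 1)
        else count) count)
    (g := fun count z =>
      (((PySem.Set.ofList (pvLookup past_lookup z)) : List Int).filter
        (fun x => PySem.Set.contains (PySem.Set.ofList past_v) x)).foldl
          (fun count x => count.modify x 0 (· + 1)) count)
    (fun acc z _ => pv_foldl_if_filter _ _ acc)
  rw [hfold, pv_count_getD
    (fun z => ((PySem.Set.ofList (pvLookup past_lookup z)) : List Int).filter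
      (fun x => PySem.Set.contains (PySem.Set.ofList past_v) x)),
    pv_between_sum]
  have h0 : ((PySem.Dict.empty : PySem.Dict Int Int)).getD x 0 = 0 := rfl
  rw [h0]
  simp only [zero_add]
  refine congrArg (List.sum : List Int → Int) (List.map_congr_left ?_)
  intro z _
  have hnd : (((PySem.Set.ofList (pvLookup past_lookup z)) : List Int).filter
      (fun x => PySem.Set.contains (PySem.Set.ofList past_v) x)).Nodup :=
    (PySem.Set.nodup_ofList _).filter _
  rw [pv_count_nodup _ hnd]
  by_cases hm : x ∈ pvLookup past_lookup z
  · simp [List.mem_filter, PySem.Set.mem_ofList, hm, hx]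
  · simp [List.mem_filter, PySem.Set.mem_ofList, hm]

-- A's binning fold, fed any list of k-values, is the count histogram
theorem pv_bin_fold (ks : List Int) (n1 n2 n3 n4 : Int) :
    ks.foldl pvBin [0, n1, n2, n3, n4]
      = [0, n1 + ks.count 1, n2 + ks.count 2, n3 + ks.count 3, n4 + ks.count 4] := by
  induction ks generalizing n1 n2 n3 n4 with
  | nil => simp
  | cons k ks ih =>
      simp only [List.foldl_cons]
      have hb : pvBin [0, n1, n2, n3, n4] k =
          [0, n1 + if k = 1 then 1 else 0, n2 + if k = 2 then 1 else 0,
            n3 + if k = 3 then 1 else 0, n4 + if k = 4 then 1 else 0] := by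
        unfold pvBin
        by_cases h : 1 ≤ k ∧ k ≤ 4
        · have : k = 1 ∨ k = 2 ∨ k = 3 ∨ k = 4 := by omega
          rcases this with h1 | h1 | h1 | h1 <;> subst h1 <;>
            simp [PySem.List.pySetD, PySem.List.pySet?, PySem.List.pyGetD, PySem.List.pyGet?,
              PySem.List.pyIdx?]
        · have h1 : ¬ k = 1 := by omega
          have h2 : ¬ k = 2 := by omega
          have h3 : ¬ k = 3 := by omega
          have h4 : ¬ k = 4 := by omega
          simp [h, h1, h2, h3, h4]
      have c : ∀ a : Int, (((k :: ks).count a : Nat) : Int)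
          = (ks.count a : Int) + (if k = a then 1 else 0) := by
        intro a
        by_cases h : a = k
        · subst h; simp
        · have h' : ¬ k = a := fun hh => h hh.symm
          simp [h']
      rw [hb, ih]
      simp only [c, List.cons.injEq]
      and_intros <;> first | trivial | ring

-- ===== VERDICT (by name: the statement is the Claim_ definition above) =====
theorem bdg_score_from_past_spec : Claim_equal_bdg_score_from_past := by
  intro past_v past_lookup _ _
  unfold Spec_bdg_score_from_past bdg_score_from_past bdg_score_from_past_alt
  have hmap : past_v.map (fun x => pvBetween past_v past_lookup x + 1)
      = past_v.map (fun x =>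
          (pvCount (PySem.Set.ofList past_v) past_v past_lookup).getD x 0 + 1) :=
    List.map_congr_left (fun x hx => by rw [pv_count_eq_between past_v past_lookup x hx])
  have hN : past_v.foldl (fun N x => pvBin N (pvBetween past_v past_lookup x + 1))
        (List.replicate 5 (0 : Int))
      = [0,
          ((past_v.map (fun x =>
            (pvCount (PySem.Set.ofList past_v) past_v past_lookup).getD x 0 + 1)).count 1 : Int),
          ((past_v.map (fun x =>
            (pvCount (PySem.Set.ofList past_v) past_v past_lookup).getD x 0 + 1)).count 2 : Int),
          ((past_v.map (fun x =>
            (pvCount (PySem.Set.ofList past_v) past_v past_lookup).getD x 0 + 1)).count 3 : Int),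
          ((past_v.map (fun x =>
            (pvCount (PySem.Set.ofList past_v) past_v past_lookup).getD x 0 + 1)).count 4 : Int)] := by
    rw [← List.foldl_map, hmap]
    have h := pv_bin_fold (past_v.map (fun x =>
      (pvCount (PySem.Set.ofList past_v) past_v past_lookup).getD x 0 + 1)) 0 0 0 0
    simpa using h
  simp only [hN]
  simp [PySem.List.pyGetD, PySem.List.pyGet?, PySem.List.pyIdx?]
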